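-- pv_equiv track=rewrite | github.com/Daniil-Vlasenko/SPBUComputationalMethods | Task2.py | sort_dic
-- ===== SOURCE A (Python) =====
-- def sort_dic(dic, x, n):
--     dic_keys = list(dic.keys())
--     dic_values = list(dic.values())
--     for i in range(len(dic) - 1):
--         for j in range(len(dic) - i - 1):
--             if abs(dic_keys[j] - x) > abs(dic_keys[j + 1] - x):
--                 dic_keys[j], dic_keys[j + 1] = dic_keys[j + 1], dic_keys[j]
--                 dic_values[j], dic_values[j + 1] = dic_values[j + 1], dic_values[j]
--     new_dic = {}
--     for j in range(n + 1):
--         new_dic[dic_keys[j]] = dic_values[j]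
--     return new_dic
-- ===== SOURCE B (Python) =====
-- import heapq
--
--
-- def sort_dic(dic, x, n):
--     # Bounded-heap partial selection instead of a full bubble sort:
--     # heapq.nsmallest keeps a size-(n+1) heap while scanning the items once,
--     # and is stable (same tie order as the stable bubble sort).
--     items = heapq.nsmallest(n + 1, dic.items(), key=lambda kv: abs(kv[0] - x))
--     return dict(items)
-- ===== Notes on version B (the rewrite author's own statement) =====
-- stated objective: faster
-- what changed: Replaces the quadratic bubble sort of key/value arrays with a single heapq.nsmallest pass that maintains a bounded size-(n+1) heap (stable, so same tie order), then builds the dict from the selected items.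
import Mathlib
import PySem

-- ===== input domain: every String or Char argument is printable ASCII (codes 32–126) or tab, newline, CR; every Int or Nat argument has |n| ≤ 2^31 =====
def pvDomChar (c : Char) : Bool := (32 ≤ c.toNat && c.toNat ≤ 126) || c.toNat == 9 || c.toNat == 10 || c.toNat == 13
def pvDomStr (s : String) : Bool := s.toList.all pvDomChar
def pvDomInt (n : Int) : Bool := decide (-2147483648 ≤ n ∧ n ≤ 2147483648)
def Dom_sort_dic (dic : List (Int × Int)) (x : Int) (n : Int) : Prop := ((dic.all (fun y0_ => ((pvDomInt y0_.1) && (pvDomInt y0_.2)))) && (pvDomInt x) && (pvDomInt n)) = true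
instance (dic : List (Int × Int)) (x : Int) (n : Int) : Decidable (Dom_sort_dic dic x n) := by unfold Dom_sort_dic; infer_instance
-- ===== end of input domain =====

-- B replaces A's quadratic bubble sort with a bounded-heap selection of the n+1 closest
-- items (heapq.nsmallest, ported by its contract: stable sort + take); faster on large dicts.


-- ===== PORT A =====
-- the comparison key abs(dic_keys[j] - x)
def pvKey (x : Int) (kv : Int × Int) : Int := |kv.1 - x|

-- inner loop `for j in range(m): if abs(keys[j]-x) > abs(keys[j+1]-x): swap at j, j+1`.
-- A swaps dic_keys and dic_values in lockstep at the same indices, i.e. it swaps the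
-- (key, value) pairs; the pass is the same adjacent compare-and-swap sweep on the pairs.
def pvBPass (x : Int) : Nat → List (Int × Int) → List (Int × Int)
  | 0, l => l
  | _ + 1, [] => []
  | _ + 1, [a] => [a]
  | m + 1, a :: b :: t =>
    if pvKey x b < pvKey x a then b :: pvBPass x m (a :: t)
    else a :: pvBPass x m (b :: t)

def sort_dic (dic : List (Int × Int)) (x : Int) (n : Int) : List (Int × Int) :=
  let len : Int := dic.length
  -- for i in range(len(dic) - 1): one bounded pass of len(dic) - i - 1 comparisons
  let srt := (PySem.List.pyRange 0 (len - 1) 1).foldl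
      (fun l i => pvBPass x (len - i - 1).toNat l) dic
  -- new_dic = {}; for j in range(n + 1): new_dic[dic_keys[j]] = dic_values[j]
  -- (srt[j] with j out of range raises IndexError in Python: excluded by Pre_, default never read)
  ((PySem.List.pyRange 0 (n + 1) 1).foldl
      (fun (d : PySem.Dict Int Int) j =>
        let kv := PySem.List.pyGetD srt j ((0 : Int), (0 : Int))
        d.insert kv.1 kv.2)
      PySem.Dict.empty).items

-- ===== PORT B =====
-- items = heapq.nsmallest(n + 1, dic.items(), key=lambda kv: abs(kv[0] - x)): the library
-- call, ported by its contract: the first n+1 items of the stable sort by the key.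
-- return dict(items)
def sort_dic_alt (dic : List (Int × Int)) (x : Int) (n : Int) : List (Int × Int) :=
  let items := (PySem.List.sorted dic (fun kv => |kv.1 - x|)).take (n + 1).toNat
  (items.foldl (fun (d : PySem.Dict Int Int) kv => d.insert kv.1 kv.2) PySem.Dict.empty).items

-- ===== PRECONDITION & SPEC =====
-- Pre_ excludes (a) n ≥ len(dic), where A raises IndexError indexing the sorted arrays, and
-- (b) lists with duplicate keys, which cannot arise from the Python dict argument (the dict
-- collapses duplicates, so such a list is not the dict A actually receives).
def Pre_sort_dic (dic : List (Int × Int)) (x : Int) (n : Int) : Prop :=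
  (dic.map Prod.fst).Nodup ∧ n < (dic.length : Int)
instance (dic : List (Int × Int)) (x : Int) (n : Int) : Decidable (Pre_sort_dic dic x n) := by
  unfold Pre_sort_dic; infer_instance

def pvWitness_sort_dic : (List (Int × Int)) × Int × Int := ([(1, 2), (3, 4)], 2, 0)

def Spec_sort_dic (dic : List (Int × Int)) (x : Int) (n : Int) (out : List (Int × Int)) : Prop := out = sort_dic_alt dic x n
instance (dic : List (Int × Int)) (x : Int) (n : Int) (out : List (Int × Int)) : Decidable (Spec_sort_dic dic x n out) := by unfold Spec_sort_dic; infer_instance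

-- ===== CLAIM (what is proved, stated in full; the proofs are below) =====
def Claim_equal_sort_dic : Prop := ∀ (dic : List (Int × Int)) (x : Int) (n : Int), Dom_sort_dic dic x n → Pre_sort_dic dic x n → Spec_sort_dic dic x n (sort_dic dic x n)

-- ===== LEMMAS AND PROOFS =====

-- stable insert "after all elements with key ≤ key a" and the right-fold insertion
-- sort it generates: a proof-only reformulation of PySem.List.sorted that is
-- compositional on the head, which the pass recursion needs
def pvInsLE (x : Int) (a : Int × Int) : List (Int × Int) → List (Int × Int)
  | [] => [a]
  | b :: t => if pvKey x a ≤ pvKey x b then a :: b :: t else b :: pvInsLE x a t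

def pvJ (x : Int) : List (Int × Int) → List (Int × Int)
  | [] => []
  | a :: t => pvInsLE x a (pvJ x t)

-- the outer loop as a recursion on the number of remaining passes
def pvPasses (x : Int) : Nat → List (Int × Int) → List (Int × Int)
  | 0, l => l
  | k + 1, l => pvPasses x k (pvBPass x (k + 1) l)

-- insertBy (strictly-before, left-fold insert) commutes past pvInsLE
theorem pv_insertBy_insLE (x : Int) (y a : Int × Int) (acc : List (Int × Int)) :
    PySem.List.insertBy (fun p q => decide (pvKey x p < pvKey x q)) y (pvInsLE x a acc)
      = pvInsLE x a (PySem.List.insertBy (fun p q => decide (pvKey x p < pvKey x q)) y acc) := by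
  induction acc with
  | nil =>
    simp only [pvInsLE, PySem.List.insertBy]
    split_ifs with h1 h2 h3 <;> simp_all [pvInsLE, PySem.List.insertBy] <;> omega
  | cons c t ih =>
    simp only [pvInsLE, PySem.List.insertBy]
    split_ifs with h1 h2 h3 <;>
      simp_all [pvInsLE, PySem.List.insertBy] <;> split_ifs <;> simp_all <;> omega

theorem pv_foldl_insLE (x : Int) (a : Int × Int) :
    ∀ (t acc : List (Int × Int)),
    t.foldl (fun acc y => PySem.List.insertBy (fun p q => decide (pvKey x p < pvKey x q)) y acc)
        (pvInsLE x a acc)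
      = pvInsLE x a
        (t.foldl (fun acc y => PySem.List.insertBy (fun p q => decide (pvKey x p < pvKey x q)) y acc) acc) := by
  intro t
  induction t with
  | nil => intro acc; rfl
  | cons y t ih =>
    intro acc
    simp only [List.foldl_cons, pv_insertBy_insLE x y a acc]
    exact ih _

-- PySem.List.sorted is the right-fold insertion sort pvJ
theorem pv_sorted_eq_J (x : Int) (l : List (Int × Int)) :
    PySem.List.sorted l (fun kv => |kv.1 - x|) = pvJ x l := by
  show PySem.List.sorted l (pvKey x) = pvJ x l
  rw [PySem.List.sorted_eq_foldl_insertBy]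
  induction l with
  | nil => rfl
  | cons a t ih =>
    simp only [List.foldl_cons, pvJ]
    have h0 : PySem.List.insertBy (fun p q => decide (pvKey x p < pvKey x q)) a [] = pvInsLE x a [] := rfl
    rw [h0, pv_foldl_insLE, ih]

-- pvInsLE of two elements with strictly different keys commutes
theorem pv_insLE_comm (x : Int) (a b : Int × Int) (h : pvKey x b < pvKey x a) :
    ∀ (s : List (Int × Int)),
    pvInsLE x b (pvInsLE x a s) = pvInsLE x a (pvInsLE x b s) := by
  intro s
  induction s with
  | nil => simp only [pvInsLE]; split_ifs <;> simp_all <;> omega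
  | cons c t ih =>
    simp only [pvInsLE]
    split_ifs <;> simp_all [pvInsLE] <;> split_ifs <;> simp_all <;> omega

-- a bubble pass does not change the stable sort
theorem pv_J_bpass (x : Int) : ∀ (m : Nat) (l : List (Int × Int)),
    pvJ x (pvBPass x m l) = pvJ x l := by
  intro m
  induction m with
  | zero => intro l; rfl
  | succ m ih =>
    intro l
    match l with
    | [] => rfl
    | [a] => rfl
    | a :: b :: t =>
      simp only [pvBPass]
      split_ifs with h
      · simp only [pvJ, ih (a :: t)]
        exact pv_insLE_comm x a b h (pvJ x t)
      · simp only [pvJ, ih (b :: t)]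

theorem pv_J_passes (x : Int) : ∀ (k : Nat) (l : List (Int × Int)),
    pvJ x (pvPasses x k l) = pvJ x l := by
  intro k
  induction k with
  | zero => intro l; rfl
  | succ k ih =>
    intro l
    show pvJ x (pvPasses x k (pvBPass x (k + 1) l)) = pvJ x l
    rw [ih, pv_J_bpass]

-- one bounded pass bubbles a maximal element to the end of its window
theorem pv_bpass_spec (x : Int) : ∀ (u : List (Int × Int)) (a : Int × Int) (s : List (Int × Int)),
    ∃ r M, pvBPass x u.length (a :: (u ++ s)) = r ++ M :: s ∧
      (r ++ [M]).Perm (a :: u) ∧ ∀ y ∈ r ++ [M], pvKey x y ≤ pvKey x M := by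
  intro u
  induction u with
  | nil =>
    intro a s
    exact ⟨[], a, rfl, List.Perm.refl _, by simp⟩
  | cons b u ih =>
    intro a s
    simp only [List.length_cons, List.cons_append, pvBPass]
    split_ifs with h
    · obtain ⟨r, M, heq, hperm, hbnd⟩ := ih a s
      refine ⟨b :: r, M, by simp [heq], ?_, ?_⟩
      · exact (List.Perm.cons b hperm).trans (List.Perm.swap a b u)
      · intro y hy
        rcases List.mem_cons.1 hy with rfl | hy'
        · have ha : pvKey x a ≤ pvKey x M := hbnd a (hperm.mem_iff.2 (by simp))
          omega
        · exact hbnd y hy'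
    · obtain ⟨r, M, heq, hperm, hbnd⟩ := ih b s
      refine ⟨a :: r, M, by simp [heq], List.Perm.cons a hperm, ?_⟩
      intro y hy
      rcases List.mem_cons.1 hy with rfl | hy'
      · have hb : pvKey x b ≤ pvKey x M := hbnd b (hperm.mem_iff.2 (by simp))
        omega
      · exact hbnd y hy'

-- after all passes the window is sorted
theorem pv_passes_sorted (x : Int) : ∀ (k : Nat) (p s : List (Int × Int)),
    p.length = k + 1 →
    s.Pairwise (fun a b => pvKey x a ≤ pvKey x b) →
    (∀ a ∈ p, ∀ b ∈ s, pvKey x a ≤ pvKey x b) →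
    ∃ q, pvPasses x k (p ++ s) = q ++ s ∧ q.Perm p ∧
      (q ++ s).Pairwise (fun a b => pvKey x a ≤ pvKey x b) := by
  intro k
  induction k with
  | zero =>
    intro p s hlen hs hps
    match p, hlen with
    | [a], _ =>
      refine ⟨[a], rfl, List.Perm.refl _, ?_⟩
      rw [List.singleton_append, List.pairwise_cons]
      exact ⟨fun b hb => hps a (by simp) b hb, hs⟩
  | succ k ih =>
    intro p s hlen hs hps
    match p with
    | a :: u =>
      have hu : u.length = k + 1 := by simpa using hlen
      obtain ⟨r, M, heq, hperm, hbnd⟩ := pv_bpass_spec x u a s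
      have hMmem : M ∈ a :: u := hperm.mem_iff.1 (by simp)
      have hrq : r.length = k + 1 := by
        have := hperm.length_eq
        simp at this; omega
      have hs' : (M :: s).Pairwise (fun a b => pvKey x a ≤ pvKey x b) :=
        List.Pairwise.cons (fun b hb => hps M hMmem b hb) hs
      have hps' : ∀ a' ∈ r, ∀ b ∈ M :: s, pvKey x a' ≤ pvKey x b := by
        intro a' ha' b hb
        have ha'm : a' ∈ a :: u := hperm.mem_iff.1 (by simp [ha'])
        rcases List.mem_cons.1 hb with rfl | hb'
        · exact hbnd a' (by simp [ha'])
        · exact hps a' ha'm b hb'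
      obtain ⟨q, heq2, hqperm, hqpw⟩ := ih r (M :: s) hrq hs' hps'
      refine ⟨q ++ [M], ?_, ?_, ?_⟩
      · show pvPasses x k (pvBPass x (k + 1) ((a :: u) ++ s)) = (q ++ [M]) ++ s
        have h1 : pvBPass x (k + 1) ((a :: u) ++ s) = r ++ M :: s := by
          rw [← hu]; simpa using heq
        rw [h1, show r ++ M :: s = r ++ (M :: s) from rfl, heq2]
        simp
      · exact ((hqperm.append_right [M]).trans hperm)
      · simpa using hqpw
    | [] => simp at hlen

-- the A-side fold over range(len(dic) - 1) is pvPasses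
theorem pv_fold_eq_passes (x : Int) (len : Int) : ∀ (k : Nat) (l : List (Int × Int)),
    (PySem.List.pyRange (len - 1 - k) (len - 1) 1).foldl
        (fun acc i => pvBPass x (len - i - 1).toNat acc) l
      = pvPasses x k l := by
  intro k
  induction k with
  | zero =>
    intro l
    rw [show (len - 1 - (0 : Nat) : Int) = len - 1 by push_cast; ring]
    rw [PySem.List.pyRange_one_eq_nil le_rfl]
    rfl
  | succ k ih =>
    intro l
    rw [PySem.List.pyRange_one_cons (by push_cast; omega)]
    simp only [List.foldl_cons]
    rw [show (len - 1 - ((k : Nat) + 1 : Nat) + 1 : Int) = len - 1 - k by push_cast; ring]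
    rw [show (len - (len - 1 - ((k : Nat) + 1 : Nat)) - 1 : Int).toNat = k + 1 by push_cast; omega]
    exact ih _

-- bubble sort computes PySem.List.sorted
theorem pv_bubble_eq_sorted (x : Int) (dic : List (Int × Int)) :
    (PySem.List.pyRange 0 ((dic.length : Int) - 1) 1).foldl
        (fun l i => pvBPass x ((dic.length : Int) - i - 1).toNat l) dic
      = PySem.List.sorted dic (fun kv => |kv.1 - x|) := by
  match dic with
  | [] =>
    rw [show ((List.length ([] : List (Int × Int)) : Int) - 1) = -1 by simp]
    rw [PySem.List.pyRange_one_eq_nil (by omega)]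
    rfl
  | h :: t =>
    set len : Int := ((h :: t).length : Int) with hlen
    have h0 : (0 : Int) = len - 1 - (t.length : Nat) := by
      rw [hlen]; push_cast [List.length_cons]; ring
    rw [h0, pv_fold_eq_passes x len t.length (h :: t)]
    clear h0
    obtain ⟨q, heq, hperm, hpw⟩ :=
      pv_passes_sorted x t.length (h :: t) [] (by simp) (by simp) (by simp)
    have heq' : pvPasses x t.length (h :: t) = q := by simpa using heq
    rw [heq']
    have hq : PySem.List.sorted q (fun kv => |kv.1 - x|) = q := by
      apply PySem.List.sorted_eq_self_of_pairwise
      simpa using hpw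
    have hJ : PySem.List.sorted q (fun kv => |kv.1 - x|)
        = PySem.List.sorted (h :: t) (fun kv => |kv.1 - x|) := by
      rw [pv_sorted_eq_J, pv_sorted_eq_J, ← heq', pv_J_passes]
    rw [← hJ, hq]

-- indexing into the taken prefix agrees with indexing into the whole sorted list
theorem pv_pyGetD_take (S : List (Int × Int)) (m : Nat) (j : Int) (d : Int × Int)
    (h0 : 0 ≤ j) (h1 : j < ((S.take m).length : Int)) :
    PySem.List.pyGetD (S.take m) j d = PySem.List.pyGetD S j d := by
  have hj : j.toNat < (S.take m).length := by omega
  have hjS : j < (S.length : Int) := by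
    have h2 : (S.take m).length ≤ S.length := by rw [List.length_take]; omega
    omega
  rw [PySem.List.pyGetD_eq_getElem _ d h0 h1, PySem.List.pyGetD_eq_getElem _ d h0 hjS,
    List.getElem_take]

-- ===== VERDICT (by name: the statement is the Claim_ definition above) =====
theorem sort_dic_spec : Claim_equal_sort_dic := by
  intro dic x n _ hp
  rcases hp with ⟨hnd, hlen⟩
  unfold Spec_sort_dic sort_dic sort_dic_alt
  simp only
  rw [pv_bubble_eq_sorted x dic]
  set S := PySem.List.sorted dic (fun kv => |kv.1 - x|) with hS
  by_cases hn : n + 1 ≤ 0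
  · rw [PySem.List.pyRange_one_eq_nil (by omega),
      show (n + 1).toNat = 0 by omega]
    rfl
  · push_neg at hn
    have hSlen : S.length = dic.length := PySem.List.length_sorted dic _ false
    have hmlen : (S.take (n + 1).toNat).length = (n + 1).toNat := by
      rw [List.length_take]
      omega
    rw [PySem.List.foldl_congr_mem _ _
      (fun (d : PySem.Dict Int Int) j =>
        (fun (d : PySem.Dict Int Int) (kv : Int × Int) => d.insert kv.1 kv.2) d
          (PySem.List.pyGetD (S.take (n + 1).toNat) j ((0 : Int), (0 : Int)))) _
      (by
        intro acc j hj
        rw [PySem.List.mem_pyRange_one] at hj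
        simp only
        rw [pv_pyGetD_take S (n + 1).toNat j ((0 : Int), (0 : Int)) hj.1
          (by rw [hmlen]; omega)])]
    have h1 := PySem.List.foldl_pyRange_zero_pyGetD' (S.take (n + 1).toNat)
      ((0 : Int), (0 : Int))
      (fun (d : PySem.Dict Int Int) (kv : Int × Int) => d.insert kv.1 kv.2) PySem.Dict.empty
    rw [hmlen, show (((n + 1).toNat : Nat) : Int) = n + 1 by omega] at h1
    exact congrArg PySem.Dict.items h1
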